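-- pv_equiv track=rewrite | github.com/akimgnts/elevia | apps/api/src/context/extractors.py | _find_sentence_with_keywords
-- ===== SOURCE A (Python) =====
-- import unicodedata
-- from typing import Dict, Iterable, List, Optional, Tuple
--
-- def _strip_accents(text: str) -> str:
--     nfkd = unicodedata.normalize("NFKD", text or "")
--     return "".join(ch for ch in nfkd if not unicodedata.combining(ch))
--
-- def _fold(text: str) -> str:
--     return _strip_accents(text).lower()
--
-- def _find_sentence_with_keywords(sentences: List[str], keywords: List[str]) -> Optional[str]:
--     if not sentences or not keywords:
--         return None
--     folded_keywords = [_fold(k) for k in keywords]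
--     for sentence in sentences:
--         folded = _fold(sentence)
--         if any(k in folded for k in folded_keywords):
--             return sentence
--     return None
-- ===== SOURCE B (Python) =====
-- import unicodedata
-- from typing import List, Optional
--
--
-- def _strip_accents(text: str) -> str:
--     nfkd = unicodedata.normalize("NFKD", text or "")
--     return "".join(ch for ch in nfkd if not unicodedata.combining(ch))
--
--
-- def _fold(text: str) -> str:
--     return _strip_accents(text).lower()
--
--
-- def _contains_any(text: str, needles: List[str]) -> bool:
--     # Single left-to-right sweep over the text: at each position, test every
--     # needle as a prefix, instead of one full substring scan per needle.
--     for i in range(len(text) + 1):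
--         for k in needles:
--             if text.startswith(k, i):
--                 return True
--     return False
--
--
-- def _find_sentence_with_keywords(sentences: List[str], keywords: List[str]) -> Optional[str]:
--     if not sentences or not keywords:
--         return None
--     folded_keywords = [_fold(k) for k in keywords]
--     return next((s for s in sentences if _contains_any(_fold(s), folded_keywords)), None)
-- ===== Notes on version B (the rewrite author's own statement) =====
-- stated objective: alternative
-- what changed: Replaces the per-keyword 'k in folded' substring scans with one position sweep over the folded sentence that tests every keyword as a prefix at each offset, and returns the first hit via next()/find-first instead of an explicit loop with early return.
import Mathlib
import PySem

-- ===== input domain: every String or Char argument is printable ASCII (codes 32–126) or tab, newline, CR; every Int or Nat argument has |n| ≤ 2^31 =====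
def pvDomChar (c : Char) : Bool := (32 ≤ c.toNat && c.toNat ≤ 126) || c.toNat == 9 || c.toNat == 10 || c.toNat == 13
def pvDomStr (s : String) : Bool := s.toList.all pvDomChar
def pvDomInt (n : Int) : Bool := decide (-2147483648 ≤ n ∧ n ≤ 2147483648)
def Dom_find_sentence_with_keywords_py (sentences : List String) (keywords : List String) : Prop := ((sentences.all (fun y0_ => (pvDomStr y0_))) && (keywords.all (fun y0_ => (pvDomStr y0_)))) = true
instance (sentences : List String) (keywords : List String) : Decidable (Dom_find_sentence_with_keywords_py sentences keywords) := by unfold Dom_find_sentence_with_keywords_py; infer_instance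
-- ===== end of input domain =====

-- B replaces A's per-keyword substring scans with one position sweep testing every
-- keyword as a prefix at each offset, and find-first instead of an explicit loop (alternative, same cost class).


-- ===== PORT A =====
-- _fold: on the printable-ASCII domain NFKD normalization is the identity and no
-- character is combining, so _strip_accents is the identity and _fold is .lower() (exact on Dom).
def pvFoldA (s : String) : String := PySem.Str.lower s

-- the 'for sentence in sentences: … return sentence' loop of A
def pvALoop (fkws : List String) : List String → Option String
  | [] => none
  | s :: rest =>
    let folded := pvFoldA s
    if fkws.any (fun k => PySem.Str.isIn k folded) then some s else pvALoop fkws rest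

def find_sentence_with_keywords_py (sentences : List String) (keywords : List String) : Option String :=
  if sentences.isEmpty || keywords.isEmpty then none
  else pvALoop (keywords.map (fun k => pvFoldA k)) sentences

-- ===== PORT B =====
def pvFoldB (s : String) : String := PySem.Str.lower s

-- _contains_any: for i in range(len(text)+1): for k in needles: if text.startswith(k, i): return True
-- text.startswith(k, i) with 0 ≤ i ≤ len(text) is exactly 'k is a prefix of text[i:]' (drop i).
def pvContainsAny (text : String) (needles : List String) : Bool :=
  (List.range (text.toList.length + 1)).any (fun i =>
    needles.any (fun k => PySem.Chars.startswith (text.toList.drop i) k.toList))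

def find_sentence_with_keywords_py_alt (sentences : List String) (keywords : List String) : Option String :=
  if sentences.isEmpty || keywords.isEmpty then none
  else
    let folded := keywords.map (fun k => pvFoldB k)
    sentences.find? (fun s => pvContainsAny (pvFoldB s) folded)

-- ===== PRECONDITION & SPEC =====
def Spec_find_sentence_with_keywords_py (sentences : List String) (keywords : List String) (out : Option String) : Prop := out = find_sentence_with_keywords_py_alt sentences keywords
instance (sentences : List String) (keywords : List String) (out : Option String) : Decidable (Spec_find_sentence_with_keywords_py sentences keywords out) := by unfold Spec_find_sentence_with_keywords_py; infer_instance

-- ===== CLAIM (what is proved, stated in full; the proofs are below) =====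
def Claim_equal_find_sentence_with_keywords_py : Prop := ∀ (sentences : List String) (keywords : List String), Dom_find_sentence_with_keywords_py sentences keywords → Spec_find_sentence_with_keywords_py sentences keywords (find_sentence_with_keywords_py sentences keywords)

-- ===== LEMMAS AND PROOFS =====

lemma pv_exists_drop_bounded (k f : List Char) :
    (∃ j, k <+: f.drop j) ↔ ∃ i < f.length + 1, k <+: f.drop i := by
  constructor
  · rintro ⟨j, hj⟩
    by_cases h : j ≤ f.length
    · exact ⟨j, by omega, hj⟩
    · refine ⟨f.length, by omega, ?_⟩
      rw [List.drop_length]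
      rw [List.drop_eq_nil_of_le (by omega)] at hj
      exact hj
  · rintro ⟨i, _, hi⟩
    exact ⟨i, hi⟩

lemma pv_any_isIn_eq_containsAny (f : String) (ks : List String) :
    ks.any (fun k => PySem.Str.isIn k f) = pvContainsAny f ks := by
  rw [Bool.eq_iff_iff]
  simp only [pvContainsAny, List.any_eq_true, List.mem_range, PySem.Str.isIn_eq,
    PySem.Chars.startswith_iff]
  constructor
  · rintro ⟨k, hk, hin⟩
    have := (PySem.Chars.exists_prefix_drop_iff_isIn (sub := k.toList) (s := f.toList)).mpr hin
    obtain ⟨i, hi, hpre⟩ := (pv_exists_drop_bounded _ _).mp this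
    exact ⟨i, hi, k, hk, hpre⟩
  · rintro ⟨i, hi, k, hk, hpre⟩
    refine ⟨k, hk, ?_⟩
    exact (PySem.Chars.exists_prefix_drop_iff_isIn (sub := k.toList) (s := f.toList)).mp ⟨i, hpre⟩

lemma pv_loop_eq_find (fkws : List String) (ss : List String) :
    pvALoop fkws ss = ss.find? (fun s => pvContainsAny (pvFoldB s) fkws) := by
  induction ss with
  | nil => rfl
  | cons s rest ih =>
    simp only [pvALoop, List.find?_cons, pvFoldA, pvFoldB]
    rw [← pv_any_isIn_eq_containsAny]
    by_cases h : (fkws.any fun k => PySem.Str.isIn k (PySem.Str.lower s)) = true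
    · rw [if_pos h, h]
    · have h' := Bool.eq_false_iff.mpr h
      rw [if_neg h, h', ih]
      rfl

-- ===== VERDICT (by name: the statement is the Claim_ definition above) =====
theorem find_sentence_with_keywords_py_spec : Claim_equal_find_sentence_with_keywords_py := by
  intro sentences keywords _
  unfold Spec_find_sentence_with_keywords_py
  unfold find_sentence_with_keywords_py find_sentence_with_keywords_py_alt
  by_cases hg : (sentences.isEmpty || keywords.isEmpty) = true
  · simp [hg]
  · rw [if_neg hg, if_neg hg]
    have : (fun k => pvFoldA k) = (fun k => pvFoldB k) := rfl
    rw [this, pv_loop_eq_find]
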